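-- pv_equiv track=rewrite | github.com/dcgoss/google-foobar | Level 3/spy_snippits.py | find_slice_range_from_closest_matches
-- ===== SOURCE A (Python) =====
-- def find_slice_range_from_closest_matches(value, lists):
--     closest_matches = [value]
--     levels_deep = 0
--     while levels_deep <= len(lists) - 1:
--         next_match = min(lists[levels_deep], key=lambda num: abs(num - value))
--         closest_matches.append(next_match)
--         levels_deep += 1
--     closest_matches.sort()
--     return [closest_matches[0], closest_matches[len(closest_matches) - 1]]
-- ===== SOURCE B (Python) =====
-- def find_slice_range_from_closest_matches(value, lists):
--     lo = hi = value
--     for lst in lists: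
--         best = min(lst, key=lambda num: abs(num - value))
--         lo = min(lo, best)
--         hi = max(hi, best)
--     return [lo, hi]
-- ===== Notes on version B (the rewrite author's own statement) =====
-- stated objective: simpler
-- what changed: Replaced the index-driven while loop that appends every closest match to a list, sorts it and reads both ends with a single for loop threading running lo/hi extremes initialized to value, so no candidate list and no sort exist at all.
import Mathlib
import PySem

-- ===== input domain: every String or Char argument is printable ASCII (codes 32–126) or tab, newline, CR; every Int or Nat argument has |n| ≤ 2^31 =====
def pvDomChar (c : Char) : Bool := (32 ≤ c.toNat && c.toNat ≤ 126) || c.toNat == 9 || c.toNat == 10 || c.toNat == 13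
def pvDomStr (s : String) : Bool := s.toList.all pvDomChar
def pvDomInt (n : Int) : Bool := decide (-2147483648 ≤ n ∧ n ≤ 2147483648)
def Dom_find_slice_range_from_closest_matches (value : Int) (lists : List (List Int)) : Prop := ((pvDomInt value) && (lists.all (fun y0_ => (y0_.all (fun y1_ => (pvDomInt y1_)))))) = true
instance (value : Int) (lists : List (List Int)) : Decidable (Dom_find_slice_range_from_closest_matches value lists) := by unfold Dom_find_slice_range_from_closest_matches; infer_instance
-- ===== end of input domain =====

-- B replaces A's append-all-candidates-then-sort-and-read-both-ends with a single pass
-- threading running min/max accumulators (objective: simpler).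


-- ===== PORT A =====
-- min(lst, key=lambda num: abs(num - value)); Python raises on an empty lst (outside Pre_),
-- where the port falls back to `value` (nothing is claimed there).
def pvClosest (value : Int) (lst : List Int) : Int :=
  (PySem.List.min? lst (fun num => (num - value).natAbs)).getD value

-- the while loop: index levels_deep walks 0 .. len(lists)-1, appending each closest match
def pvLoopA (value : Int) (lists : List (List Int)) (levels_deep : Nat) (closest_matches : List Int) : List Int :=
  if h : levels_deep < lists.length then
    pvLoopA value lists (levels_deep + 1) (closest_matches ++ [pvClosest value (lists.getD levels_deep [])])
  else closest_matches
  termination_by lists.length - levels_deep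

def find_slice_range_from_closest_matches (value : Int) (lists : List (List Int)) : List Int :=
  let closest_matches := pvLoopA value lists 0 [value]
  let sorted := PySem.List.sorted closest_matches (fun x => x) false
  [sorted.getD 0 0, sorted.getD (sorted.length - 1) 0]

-- ===== PORT B =====
def find_slice_range_from_closest_matches_alt (value : Int) (lists : List (List Int)) : List Int :=
  let p := lists.foldl
    (fun (p : Int × Int) lst =>
      let best := (PySem.List.min? lst (fun num => (num - value).natAbs)).getD value
      (min p.1 best, max p.2 best))
    (value, value)
  [p.1, p.2]

-- ===== PRECONDITION & SPEC =====
-- Pre_ excludes inputs with an empty sublist, on which Python A (and Python B) raise ValueError from min([]).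
def Pre_find_slice_range_from_closest_matches (value : Int) (lists : List (List Int)) : Prop :=
  ∀ l ∈ lists, l ≠ []
instance (value : Int) (lists : List (List Int)) : Decidable (Pre_find_slice_range_from_closest_matches value lists) := by unfold Pre_find_slice_range_from_closest_matches; infer_instance

def pvWitness_find_slice_range_from_closest_matches : Int × List (List Int) := (5, [[1, 9], [7, 2]])

def Spec_find_slice_range_from_closest_matches (value : Int) (lists : List (List Int)) (out : List Int) : Prop := out = find_slice_range_from_closest_matches_alt value lists
instance (value : Int) (lists : List (List Int)) (out : List Int) : Decidable (Spec_find_slice_range_from_closest_matches value lists out) := by unfold Spec_find_slice_range_from_closest_matches; infer_instance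

-- ===== CLAIM (what is proved, stated in full; the proofs are below) =====
def Claim_equal_find_slice_range_from_closest_matches : Prop := ∀ (value : Int) (lists : List (List Int)), Dom_find_slice_range_from_closest_matches value lists → Pre_find_slice_range_from_closest_matches value lists → Spec_find_slice_range_from_closest_matches value lists (find_slice_range_from_closest_matches value lists)

-- ===== LEMMAS AND PROOFS =====

-- A's index loop is exactly "append the closest match of every remaining sublist"
theorem pvLoopA_eq_aux (value : Int) (lists : List (List Int)) :
    ∀ n k acc, lists.length - k = n →
      pvLoopA value lists k acc = acc ++ (lists.drop k).map (pvClosest value) := by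
  intro n
  induction n with
  | zero =>
    intro k acc h
    rw [pvLoopA, dif_neg (by omega), List.drop_eq_nil_of_le (by omega)]
    simp
  | succ n ih =>
    intro k acc h
    have hk : k < lists.length := by omega
    rw [pvLoopA, dif_pos hk, ih (k + 1) _ (by omega)]
    rw [List.getD_eq_getElem lists [] hk, List.drop_eq_getElem_cons hk,
        List.map_cons, List.append_cons]
    simp

theorem pvLoopA_eq (value : Int) (lists : List (List Int)) (k : Nat) (acc : List Int) :
    pvLoopA value lists k acc = acc ++ (lists.drop k).map (pvClosest value) :=
  pvLoopA_eq_aux value lists _ k acc rfl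

-- head of the Python-sorted list of (x :: t) is the running min
theorem sorted_head (x : Int) (t : List Int) :
    (PySem.List.sorted (x :: t) (fun y => y) false).getD 0 0 = t.foldl min x := by
  have hperm : (PySem.List.sorted (x :: t) (fun y => y) false).Perm (x :: t) :=
    PySem.List.sorted_perm _ _ _
  set s := PySem.List.sorted (x :: t) (fun y => y) false with hs
  have hlen : 0 < s.length := by
    have := hperm.length_eq; simp at this; omega
  rw [List.getD_eq_getElem s 0 hlen]
  have hmem0 : s[0] ∈ x :: t := hperm.mem_iff.mp (List.getElem_mem hlen)
  have hminle := PySem.List.foldl_min_le t x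
  rw [List.mem_cons] at hmem0
  have hmlow : t.foldl min x ≤ s[0] := by
    rcases hmem0 with h | h
    · rw [h]; exact hminle.1
    · exact hminle.2 _ h
  have hmmem : t.foldl min x ∈ s := by
    rcases PySem.List.foldl_min_mem t x with h | h
    · rw [h]; exact hperm.mem_iff.mpr (by simp)
    · exact hperm.mem_iff.mpr (by simp [h])
  obtain ⟨i, hi, hival⟩ := List.getElem_of_mem hmmem
  have hi' : i < (PySem.List.sorted (x :: t) (fun y => y) false).length := by
    rw [← hs]; exact hi
  have h2 := PySem.List.sorted_id_getElem_mono (x :: t) (p := 0) (q := i) (by omega) hi'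
  have h3 : s[0] ≤ s[i] := h2
  omega

-- last of the Python-sorted list of (x :: t) is the running max
theorem sorted_last (x : Int) (t : List Int) :
    (PySem.List.sorted (x :: t) (fun y => y) false).getD
      ((PySem.List.sorted (x :: t) (fun y => y) false).length - 1) 0 = t.foldl max x := by
  have hperm : (PySem.List.sorted (x :: t) (fun y => y) false).Perm (x :: t) :=
    PySem.List.sorted_perm _ _ _
  set s := PySem.List.sorted (x :: t) (fun y => y) false with hs
  have hlen : 0 < s.length := by
    have := hperm.length_eq; simp at this; omega
  have hlast : s.length - 1 < s.length := by omega
  rw [List.getD_eq_getElem s _ hlast]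
  have hmeml : s[s.length - 1] ∈ x :: t := hperm.mem_iff.mp (List.getElem_mem hlast)
  have hmaxle := PySem.List.le_foldl_max t x
  rw [List.mem_cons] at hmeml
  have hmhigh : s[s.length - 1] ≤ t.foldl max x := by
    rcases hmeml with h | h
    · rw [h]; exact hmaxle.1
    · exact hmaxle.2 _ h
  have hmmem : t.foldl max x ∈ s := by
    rcases PySem.List.foldl_max_mem t x with h | h
    · rw [h]; exact hperm.mem_iff.mpr (by simp)
    · exact hperm.mem_iff.mpr (by simp [h])
  obtain ⟨i, hi, hival⟩ := List.getElem_of_mem hmmem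
  have hl' : s.length - 1 < (PySem.List.sorted (x :: t) (fun y => y) false).length := by
    rw [← hs]; exact hlast
  have h2 := PySem.List.sorted_id_getElem_mono (x :: t) (p := i) (q := s.length - 1) (by omega) hl'
  have h3 : s[i] ≤ s[s.length - 1] := h2
  omega

-- ===== VERDICT (by name: the statement is the Claim_ definition above) =====
theorem find_slice_range_from_closest_matches_spec : Claim_equal_find_slice_range_from_closest_matches := by
  intro value lists _ _
  unfold Spec_find_slice_range_from_closest_matches
  unfold find_slice_range_from_closest_matches find_slice_range_from_closest_matches_alt
  rw [pvLoopA_eq]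
  simp only [List.drop_zero, List.singleton_append]
  rw [PySem.List.foldl_prod_mk
    (f := fun lo lst => min lo ((PySem.List.min? lst fun num => (num - value).natAbs).getD value))
    (g := fun hi lst => max hi ((PySem.List.min? lst fun num => (num - value).natAbs).getD value))]
  rw [sorted_head, sorted_last]
  simp [List.foldl_map, pvClosest]
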